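-- pv_equiv track=rewrite | github.com/tail-event/advent-of-code | aoc2023/aoc_py/aoc12/aoc12.py | get_match_pos
-- ===== SOURCE A (Python) =====
-- def get_match_pos(record: list[str], damaged_group: list[int], pos: int) -> tuple[int, bool]:
--     sub_record = record[: pos + 1]
--     groups = [g for g in ("".join(sub_record)).split(".") if len(g) > 0]
--     is_ok = True
--
--     if not groups:
--         return 0, True
--
--     len_groups = [len(g) for g in groups if len(g) > 0]
--
--     if len(len_groups) > len(damaged_group):
--         is_ok = False
--
--     match_pos = 0
--     for group, dmg_group in zip(len_groups, damaged_group):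
--         if group == dmg_group:
--             match_pos += 1
--         else:
--             return match_pos, False
--
--     return match_pos, is_ok
-- ===== SOURCE B (Python) =====
-- def get_match_pos(record: list[str], damaged_group: list[int], pos: int) -> tuple[int, bool]:
--     todo = damaged_group
--     matched = 0
--     run = 0
--     for ch in "".join(record[: pos + 1]) + ".":
--         if ch == ".":
--             if run != 0:
--                 if not todo or todo[0] != run:
--                     return matched, False
--                 todo = todo[1:]
--                 matched += 1
--                 run = 0
--         else:
--             run += 1
--     return matched, True
-- ===== Notes on version B (the rewrite author's own statement) =====
-- stated objective: simpler
-- what changed: Replaces join+split('.')+filter+zip over group lists with a single run-length scan over the joined characters that consumes damaged_group from the front, with no intermediate group lists.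
import Mathlib
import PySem

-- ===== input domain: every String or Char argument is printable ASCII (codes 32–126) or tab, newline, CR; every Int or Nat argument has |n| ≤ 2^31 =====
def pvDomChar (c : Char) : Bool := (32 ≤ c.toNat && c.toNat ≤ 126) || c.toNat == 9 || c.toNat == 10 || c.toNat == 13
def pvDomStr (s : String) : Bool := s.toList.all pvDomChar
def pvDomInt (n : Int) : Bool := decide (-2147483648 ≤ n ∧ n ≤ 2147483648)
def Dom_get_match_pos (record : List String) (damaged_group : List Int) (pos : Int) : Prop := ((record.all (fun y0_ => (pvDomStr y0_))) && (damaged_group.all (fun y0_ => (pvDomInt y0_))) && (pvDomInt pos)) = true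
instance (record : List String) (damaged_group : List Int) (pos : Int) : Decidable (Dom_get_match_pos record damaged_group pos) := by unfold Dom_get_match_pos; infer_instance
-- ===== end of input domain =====

-- B replaces join+split('.')+zip over group lists with one run-length scan consuming damaged_group from the front (objective: simpler).

-- ===== PORT A =====
-- A's 'for group, dmg_group in zip(len_groups, damaged_group)' loop with early return;
-- carries match_pos and the precomputed is_ok flag.
def gmpLoopA : List Int → List Int → Int → Bool → Int × Bool
  | [], _, mp, ok => (mp, ok)
  | _ :: _, [], mp, ok => (mp, ok)
  | g :: gs, d :: ds, mp, ok => if g = d then gmpLoopA gs ds (mp + 1) ok else (mp, false)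

def get_match_pos (record : List String) (damaged_group : List Int) (pos : Int) : Int × Bool :=
  let sub_record := PySem.List.slice record none (some (pos + 1))
  let joined := PySem.Chars.join [] (sub_record.map String.toList)
  let groups := (PySem.Chars.splitOn joined ['.']).filter (fun g => decide (0 < g.length))
  if groups = [] then (0, true)
  else
    let len_groups := (groups.filter (fun g => decide (0 < g.length))).map (fun g => (g.length : Int))
    let is_ok : Bool := !(decide ((len_groups.length : Int) > (damaged_group.length : Int)))
    gmpLoopA len_groups damaged_group 0 is_ok

-- ===== PORT B =====
-- B's character loop: run = current run length, todo = groups not yet matched, matched = count.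
def gmpScanB : List Char → List Int → Int → Int → Int × Bool
  | [], _, matched, _ => (matched, true)
  | c :: rest, todo, matched, run =>
    if c = '.' then
      if run ≠ 0 then
        match todo with
        | [] => (matched, false)
        | d :: ds => if d ≠ run then (matched, false) else gmpScanB rest ds (matched + 1) 0
      else gmpScanB rest todo matched run
    else gmpScanB rest todo matched (run + 1)

def get_match_pos_alt (record : List String) (damaged_group : List Int) (pos : Int) : Int × Bool :=
  let joined := PySem.Chars.join [] ((PySem.List.slice record none (some (pos + 1))).map String.toList)
  gmpScanB (joined ++ ['.']) damaged_group 0 0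

-- ===== PRECONDITION & SPEC =====
def Spec_get_match_pos (record : List String) (damaged_group : List Int) (pos : Int) (out : Int × Bool) : Prop := out = get_match_pos_alt record damaged_group pos
instance (record : List String) (damaged_group : List Int) (pos : Int) (out : Int × Bool) : Decidable (Spec_get_match_pos record damaged_group pos out) := by unfold Spec_get_match_pos; infer_instance

-- ===== CLAIM (what is proved, stated in full; the proofs are below) =====
def Claim_equal_get_match_pos : Prop := ∀ (record : List String) (damaged_group : List Int) (pos : Int), Dom_get_match_pos record damaged_group pos → Spec_get_match_pos record damaged_group pos (get_match_pos record damaged_group pos)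

-- ===== LEMMAS AND PROOFS =====

-- split on '.' written as plain structural recursion (proof-side model of PySem.Chars.splitOn)
def gmpSplit : List Char → List Char → List (List Char)
  | [], cur => [cur.reverse]
  | c :: rest, cur => if c = '.' then cur.reverse :: gmpSplit rest [] else gmpSplit rest (c :: cur)

lemma gmpSplit_go (fuel : Nat) :
    ∀ (l cur : List Char) (acc : List (List Char)), l.length < fuel →
      PySem.Chars.splitOn.go ['.'] fuel l cur acc = acc.reverse ++ gmpSplit l cur := by
  induction fuel with
  | zero => intro l cur acc h; omega
  | succ n ih =>
    intro l cur acc h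
    cases l with
    | nil => simp [PySem.Chars.splitOn.go, gmpSplit]
    | cons c rest =>
      rw [PySem.Chars.splitOn.go]
      by_cases hc : c = '.'
      · subst hc
        simp only [List.isPrefixOf, BEq.rfl, Bool.true_and, if_true]
        rw [ih _ _ _ (by simpa using Nat.lt_of_succ_lt_succ h)]
        simp [gmpSplit]
      · have : (['.'].isPrefixOf (c :: rest)) = false := by
          simp [List.isPrefixOf]; exact fun hh => hc (by simpa using hh.symm)
        rw [this]
        simp only [Bool.false_eq_true, if_false]
        rw [ih _ _ _ (by simpa using Nat.lt_of_succ_lt_succ h)]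
        simp [gmpSplit, hc]

lemma gmpSplitOn_eq (s : List Char) : PySem.Chars.splitOn s ['.'] = gmpSplit s [] := by
  rw [PySem.Chars.splitOn, gmpSplit_go (s.length + 1) s [] [] (Nat.lt_succ_self _)]
  rfl

-- run lengths of the maximal non-'.' runs, given a pending run of length `run`
def gmpLens : List Char → Int → List Int
  | [], run => if run = 0 then [] else [run]
  | c :: rest, run =>
    if c = '.' then (if run = 0 then gmpLens rest 0 else run :: gmpLens rest 0)
    else gmpLens rest (run + 1)

-- B's scan computes A's loop on the run lengths
def gmpLoopB : List Int → List Int → Int → Int × Bool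
  | [], _, mp => (mp, true)
  | _ :: _, [], mp => (mp, false)
  | g :: gs, d :: ds, mp => if g = d then gmpLoopB gs ds (mp + 1) else (mp, false)

lemma gmpScanB_eq (s : List Char) : ∀ (todo : List Int) (matched run : Int),
    gmpScanB (s ++ ['.']) todo matched run = gmpLoopB (gmpLens s run) todo matched := by
  induction s with
  | nil =>
    intro todo matched run
    by_cases hr : run = 0
    · subst hr; cases todo <;> simp [gmpScanB, gmpLens, gmpLoopB]
    · cases todo with
      | nil => simp [gmpScanB, gmpLens, gmpLoopB, hr]
      | cons d ds =>
        by_cases hd : d = run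
        · subst hd; simp [gmpScanB, gmpLens, gmpLoopB, hr]
        · simp [gmpScanB, gmpLens, gmpLoopB, hr, hd, Ne.symm hd]
  | cons c rest ih =>
    intro todo matched run
    by_cases hc : c = '.'
    · subst hc
      by_cases hr : run = 0
      · subst hr; simpa [gmpScanB, gmpLens] using ih todo matched 0
      · cases todo with
        | nil => simp [gmpScanB, gmpLens, gmpLoopB, hr]
        | cons d ds =>
          by_cases hd : d = run
          · subst hd; simpa [gmpScanB, gmpLens, gmpLoopB, hr] using ih ds (matched + 1) 0
          · simp [gmpScanB, gmpLens, gmpLoopB, hr, hd, Ne.symm hd]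
    · simpa [gmpScanB, gmpLens, hc] using ih todo matched (run + 1)

lemma gmpLoopA_eq (lens : List Int) : ∀ (todo : List Int) (mp : Int),
    gmpLoopA lens todo mp (decide (lens.length ≤ todo.length)) = gmpLoopB lens todo mp := by
  induction lens with
  | nil => intro todo mp; simp [gmpLoopA, gmpLoopB]
  | cons g gs ih =>
    intro todo mp
    cases todo with
    | nil => simp [gmpLoopA, gmpLoopB]
    | cons d ds =>
      by_cases hg : g = d
      · subst hg; simpa [gmpLoopA, gmpLoopB] using ih ds (mp + 1)
      · simp [gmpLoopA, gmpLoopB, hg]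

lemma gmpLens_eq (s : List Char) : ∀ (cur : List Char),
    gmpLens s (cur.length : Int) =
      ((gmpSplit s cur).filter (fun g => decide (0 < g.length))).map (fun g => (g.length : Int)) := by
  induction s with
  | nil =>
    intro cur
    cases cur
    · simp [gmpSplit, gmpLens]
    · simp [gmpSplit, gmpLens]; omega
  | cons c rest ih =>
    intro cur
    by_cases hc : c = '.'
    · subst hc
      cases cur with
      | nil => simpa [gmpSplit, gmpLens] using ih []
      | cons x xs =>
        have := ih []
        simp only [List.length_nil, Int.natCast_zero] at this
        simp [gmpSplit, gmpLens, this]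
        omega
    · have := ih (c :: cur)
      simp only [List.length_cons] at this
      simp [gmpSplit, gmpLens, hc]
      rw [← this]
      norm_num

-- ===== VERDICT (by name: the statement is the Claim_ definition above) =====
theorem get_match_pos_spec : Claim_equal_get_match_pos := by
  intro record dg pos _
  unfold Spec_get_match_pos get_match_pos get_match_pos_alt
  dsimp only
  rw [gmpScanB_eq, gmpSplitOn_eq]
  have hlens := gmpLens_eq (PySem.Chars.join []
      ((PySem.List.slice record none (some (pos + 1))).map String.toList)) []
  simp only [List.length_nil, Int.natCast_zero] at hlens
  rw [hlens]
  set G := (gmpSplit (PySem.Chars.join []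
      ((PySem.List.slice record none (some (pos + 1))).map String.toList)) []).filter
      (fun g => decide (0 < g.length)) with hG
  have hGG : G.filter (fun g => decide (0 < g.length)) = G := by
    rw [hG, List.filter_filter]; simp
  by_cases hnil : G = []
  · simp [hnil, gmpLoopB]
  · rw [if_neg hnil, hGG]
    have hok : (!(decide (((G.map (fun g => (g.length : Int))).length : Int) > (dg.length : Int))))
        = decide ((G.map (fun g => (g.length : Int))).length ≤ dg.length) := by
      simp only [List.length_map]
      by_cases h : G.length ≤ dg.length
      · simp only [h, decide_true]
        simp; omega
      · simp only [h, decide_false]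
        simp; omega
    rw [hok, gmpLoopA_eq]
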